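-- pv_equiv track=rewrite | github.com/NischalBhatewara/HackerRankWeekOfCode27 | hackonacci.py | get_hackonacci_matrix
-- ===== SOURCE A (Python) =====
-- hack_pattern = {1: 'Y', 2: 'X', 3: 'Y', 4: 'X', 5: 'X', 6: 'Y', 0: 'Y'}
--
-- def get_hackonacci_matrix(size):
--     matrix = []
--     for i in range(1, size + 1):
--         row = []
--         for j in range(1, size + 1):
--             # row.append('X' if hackonacci((i * j) ** 2) % 2 == 0 else 'Y')
--             row.append(hack_pattern[(i * j) ** 2 % 7])  # using the found pattern
--         matrix.append(row)
--     return matrix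
-- ===== SOURCE B (Python) =====
-- def get_hackonacci_matrix(size):
--     # The cell (i, j) depends only on (i * j) % 7, so each row is periodic with
--     # period 7 and only the residue i % 7 matters: precompute 7 tiled rows.
--     q = ['Y', 'Y', 'X', 'X', 'X', 'X', 'Y']  # q[r] = hack_pattern[r * r % 7]
--     reps = (size + 6) // 7 if size > 0 else 0
--     rows = []
--     for a in range(7):
--         base = [q[(a * j) % 7] for j in range(1, 8)]
--         rows.append((base * reps)[:size])
--     return [rows[i % 7] for i in range(1, size + 1)]
-- ===== Notes on version B (the rewrite author's own statement) =====
-- stated objective: faster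
-- what changed: Instead of a dict lookup of (i*j)**2 % 7 for each of the n*n cells, B exploits that every cell depends only on (i*j) % 7: it precomputes the 7 possible period-7 row tiles once, builds each of the 7 distinct rows by list repetition plus one slice, and assembles the matrix by picking the row for i % 7.
import Mathlib
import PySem

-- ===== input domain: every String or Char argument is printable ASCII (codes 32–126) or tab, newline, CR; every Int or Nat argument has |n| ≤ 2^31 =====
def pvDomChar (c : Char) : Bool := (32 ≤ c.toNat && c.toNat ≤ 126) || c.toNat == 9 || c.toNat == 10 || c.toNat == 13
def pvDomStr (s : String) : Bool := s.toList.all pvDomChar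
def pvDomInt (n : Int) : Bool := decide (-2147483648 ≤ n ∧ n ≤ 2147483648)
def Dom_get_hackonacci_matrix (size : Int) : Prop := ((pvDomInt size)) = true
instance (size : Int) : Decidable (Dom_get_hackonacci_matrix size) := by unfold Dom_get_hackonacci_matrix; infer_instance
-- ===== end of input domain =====

-- B replaces A's per-cell dict lookup by 7 precomputed period-7 tiled rows reused by residue (cells depend only on i*j mod 7).

-- ===== PORT A =====
def hack_pattern : PySem.Dict Int String :=
  PySem.Dict.ofList [(1, "Y"), (2, "X"), (3, "Y"), (4, "X"), (5, "X"), (6, "Y"), (0, "Y")]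

def get_hackonacci_matrix (size : Int) : List (List String) :=
  (PySem.List.pyRange 1 (size + 1) 1).foldl
    (fun matrix i =>
      matrix ++ [(PySem.List.pyRange 1 (size + 1) 1).foldl
        (fun row j => row ++ [(hack_pattern.get? (PySem.Int.mod ((i * j) ^ 2) 7)).getD ""]) []])
    []

-- ===== PORT B =====
def pvQ : List String := ["Y", "Y", "X", "X", "X", "X", "Y"]

def get_hackonacci_matrix_alt (size : Int) : List (List String) :=
  let reps : Int := if size > 0 then PySem.Int.floordiv (size + 6) 7 else 0
  let rows : List (List String) :=
    (PySem.List.pyRange 0 7 1).foldl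
      (fun rows a =>
        let base := (PySem.List.pyRange 1 8 1).map
          (fun j => (PySem.List.pyGet? pvQ (PySem.Int.mod (a * j) 7)).getD "")
        rows ++ [PySem.List.slice ((List.replicate reps.toNat base).flatten) none (some size)])
      []
  (PySem.List.pyRange 1 (size + 1) 1).map
    (fun i => (PySem.List.pyGet? rows (PySem.Int.mod i 7)).getD [])

-- ===== PRECONDITION & SPEC =====
def Spec_get_hackonacci_matrix (size : Int) (out : List (List String)) : Prop := out = get_hackonacci_matrix_alt size
instance (size : Int) (out : List (List String)) : Decidable (Spec_get_hackonacci_matrix size out) := by unfold Spec_get_hackonacci_matrix; infer_instance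

-- ===== CLAIM (what is proved, stated in full; the proofs are below) =====
def Claim_equal_get_hackonacci_matrix : Prop := ∀ (size : Int), Dom_get_hackonacci_matrix size → Spec_get_hackonacci_matrix size (get_hackonacci_matrix size)

-- ===== LEMMAS AND PROOFS =====

def pvCellA (i j : Int) : String := (hack_pattern.get? ((i * j) ^ 2 % 7)).getD ""

def pvBase (a : Int) : List String :=
  (PySem.List.pyRange 1 8 1).map (fun j => (PySem.List.pyGet? pvQ (a * j % 7)).getD "")

def pvRowFor (size a : Int) : List String :=
  PySem.List.slice
    ((List.replicate ((if 0 < size then (size + 6) / 7 else 0)).toNat (pvBase a)).flatten)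
    none (some size)

theorem pvFlatSing {α β : Type} (l : List α) (f : α → β) :
    (l.map fun x => [f x]).flatten = l.map f := by
  induction l with
  | nil => rfl
  | cons x xs ih => simp [ih]

theorem pvA_eq_map (size : Int) :
    get_hackonacci_matrix size =
      (PySem.List.pyRange 1 (size + 1) 1).map
        (fun i => (PySem.List.pyRange 1 (size + 1) 1).map (fun j => pvCellA i j)) := by
  simp [get_hackonacci_matrix, pvCellA, pvFlatSing]

theorem pvB_eq_map (size : Int) :
    get_hackonacci_matrix_alt size =
      (PySem.List.pyRange 1 (size + 1) 1).map
        (fun i => (PySem.List.pyGet? ((PySem.List.pyRange 0 7 1).map (fun a => pvRowFor size a))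
          (i % 7)).getD []) := by
  simp [get_hackonacci_matrix_alt, pvRowFor, pvBase, pvFlatSing]

-- flatten of replicate, indexed: periodic lookup
theorem pvRepGet {α : Type} (l : List α) (k t : Nat) (ht : t < k * l.length) :
    ((List.replicate k l).flatten)[t]? = l[t % l.length]? := by
  induction k generalizing t with
  | zero => omega
  | succ k ih =>
    have hx : (k + 1) * l.length = k * l.length + l.length := by ring
    have hflat : (List.replicate (k + 1) l).flatten = l ++ (List.replicate k l).flatten := by
      simp [List.replicate_succ]
    rw [hflat]
    rw [hx] at ht
    by_cases h : t < l.length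
    · rw [List.getElem?_append_left h, Nat.mod_eq_of_lt h]
    · have h' : l.length ≤ t := by omega
      rw [List.getElem?_append_right h']
      rw [ih (t - l.length) (by omega)]
      rw [Nat.mod_eq_sub_mod h']

-- the scalar fact: the tile entry equals A's dict lookup
theorem pvScalar (i : Int) (t : Nat) :
    (PySem.List.pyGet? pvQ (i % 7 * (1 + ((t % 7 : Nat) : Int)) % 7)).getD "" =
      pvCellA i (1 + (t : Int)) := by
  rw [pvCellA]
  have hcast : ((t % 7 : Nat) : Int) = (t : Int) % 7 := by omega
  have hidx : i % 7 * (1 + ((t % 7 : Nat) : Int)) % 7 = (i * (1 + (t : Int))) % 7 := by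
    rw [hcast]
    conv_lhs => rw [Int.mul_emod, Int.add_emod 1 ((t : Int) % 7)]
    conv_rhs => rw [Int.mul_emod, Int.add_emod 1 (t : Int)]
    simp [Int.emod_emod_of_dvd]
  rw [hidx]
  have hpow : ((i * (1 + (t : Int))) ^ 2) % 7 = (((i * (1 + (t : Int))) % 7) ^ 2) % 7 := by
    rw [pow_two, pow_two, Int.mul_emod]
  rw [hpow]
  have h0 : 0 ≤ (i * (1 + (t : Int))) % 7 := Int.emod_nonneg _ (by norm_num)
  have h1 : (i * (1 + (t : Int))) % 7 < 7 := Int.emod_lt_of_pos _ (by norm_num)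
  generalize (i * (1 + (t : Int))) % 7 = r at h0 h1 ⊢
  interval_cases r <;> decide

theorem pvRow (size i : Int) (hsz : 1 ≤ size) :
    pvRowFor size (i % 7) =
      (PySem.List.pyRange 1 (size + 1) 1).map (fun j => pvCellA i j) := by
  set n : Nat := size.toNat with hn
  have hns : size = (n : Int) := by omega
  have hbl : (pvBase (i % 7)).length = 7 := by
    simp [pvBase, PySem.List.length_pyRange_one]
  have hk : n ≤ ((size + 6) / 7).toNat * 7 := by omega
  unfold pvRowFor
  rw [if_pos (by omega : (0:Int) < size)]
  rw [hns, PySem.List.slice_to_natCast]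
  rw [← hns]
  apply List.ext_getElem?
  intro t
  by_cases ht : t < n
  · rw [List.getElem?_take_of_lt ht]
    rw [pvRepGet _ _ _ (by rw [hbl]; omega), hbl]
    have hrhs : ((PySem.List.pyRange 1 (size + 1) 1).map (fun j => pvCellA i j))[t]? =
        some (pvCellA i (1 + (t : Int))) := by
      rw [List.getElem?_map, PySem.List.getElem?_pyRange_one, if_pos (by omega)]
      rfl
    have hlhs : (pvBase (i % 7))[t % 7]? =
        some ((PySem.List.pyGet? pvQ (i % 7 * (1 + ((t % 7 : Nat) : Int)) % 7)).getD "") := by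
      rw [pvBase, List.getElem?_map, PySem.List.getElem?_pyRange_one, if_pos (by omega)]
      rfl
    rw [hrhs, hlhs, pvScalar]
  · rw [List.getElem?_eq_none (by simp; omega)]
    rw [List.getElem?_eq_none]
    simp only [List.length_map, PySem.List.length_pyRange_one]
    omega

-- ===== VERDICT (by name: the statement is the Claim_ definition above) =====
theorem get_hackonacci_matrix_spec : Claim_equal_get_hackonacci_matrix := by
  intro size _
  unfold Spec_get_hackonacci_matrix
  rw [pvA_eq_map, pvB_eq_map]
  apply List.map_congr_left
  intro i hi
  rw [PySem.List.mem_pyRange_one] at hi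
  have hsz : 1 ≤ size := by omega
  have h0 : 0 ≤ i % 7 := Int.emod_nonneg _ (by norm_num)
  have h1 : i % 7 < 7 := Int.emod_lt_of_pos _ (by norm_num)
  have hget : PySem.List.pyGet? ((PySem.List.pyRange 0 7 1).map (fun a => pvRowFor size a))
      (i % 7) = some (pvRowFor size (i % 7)) := by
    rw [PySem.List.pyGet?_of_nonneg _ h0]
    rw [List.getElem?_map, PySem.List.getElem?_pyRange_one, if_pos (by omega)]
    simp [Int.toNat_of_nonneg h0]
  rw [hget]
  simp only [Option.getD_some]
  exact (pvRow size i hsz).symm
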